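-- pv_equiv track=rewrite | github.com/nightowlish/AlgoExpert-Python-Solutions | medium/minimum_characters_for_words.py | minimumCharactersForWords
-- ===== SOURCE A (Python) =====
-- def minimumCharactersForWords(words):
--     chars_frequencies = {}
--     for word in words:
--         remaining_chars = dict(chars_frequencies)
--         for char in word:
--             if not char in chars_frequencies:
--                 chars_frequencies[char] = 1
--                 remaining_chars[char] = 0
--                 continue
--             if remaining_chars[char]:
--                 remaining_chars[char] -= 1
--                 continue
--             chars_frequencies[char] += 1
--     needed_chars = []
--     for char, count in chars_frequencies.items():
--         for i in range(count):
--             needed_chars.append(char)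
--     return needed_chars
-- ===== SOURCE B (Python) =====
-- def minimumCharactersForWords(words):
--     seen = set()
--     order = []
--     for word in words:
--         for char in word:
--             if char not in seen:
--                 seen.add(char)
--                 order.append(char)
--     needed_chars = []
--     for char in order:
--         count = max(word.count(char) for word in words)
--         needed_chars.extend(char * count)
--     return needed_chars
-- ===== Notes on version B (the rewrite author's own statement) =====
-- stated objective: alternative
-- what changed: Replaces A's single-pass dict of incrementally-updated running maxima (with a per-word 'remaining' copy of the dict) by a two-phase structure: first collect distinct characters in first-appearance order, then for each character rescan all words with str.count and take the max.
import Mathlib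
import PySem

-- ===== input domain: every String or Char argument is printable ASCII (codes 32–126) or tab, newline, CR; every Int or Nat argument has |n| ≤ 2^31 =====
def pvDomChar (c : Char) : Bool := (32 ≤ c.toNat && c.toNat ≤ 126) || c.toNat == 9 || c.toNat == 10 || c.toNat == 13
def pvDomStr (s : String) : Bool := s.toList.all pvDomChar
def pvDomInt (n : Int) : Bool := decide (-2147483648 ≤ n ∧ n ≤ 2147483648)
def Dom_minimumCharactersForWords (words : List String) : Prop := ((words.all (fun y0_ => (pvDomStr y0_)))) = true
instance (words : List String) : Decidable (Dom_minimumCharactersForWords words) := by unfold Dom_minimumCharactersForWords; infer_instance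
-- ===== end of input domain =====

-- B replaces A's single-pass incremental running-max dict (with a per-word "remaining" copy)
-- by: collect distinct chars in first-appearance order, then per char take max of word.count over all words.
-- ===== PORT A =====
def mcwStep (st : PySem.Dict Char Int × PySem.Dict Char Int) (c : Char) :
    PySem.Dict Char Int × PySem.Dict Char Int :=
  if st.1.contains c = false then (st.1.insert c 1, st.2.insert c 0)
  else if st.2.getD c 0 ≠ 0 then (st.1, st.2.insert c (st.2.getD c 0 - 1))
  else (st.1.insert c (st.1.getD c 0 + 1), st.2)

def mcwWord (freq : PySem.Dict Char Int) (w : String) : PySem.Dict Char Int :=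
  (w.toList.foldl mcwStep (freq, freq)).1

def minimumCharactersForWords (words : List String) : List String :=
  let freq := words.foldl mcwWord PySem.Dict.empty
  freq.items.foldl
    (fun acc p => acc ++ (PySem.List.pyRange 0 p.2 1).map (fun _ => String.ofList [p.1])) []

-- ===== PORT B =====
def mcwOrder (words : List String) : PySem.Set Char × List Char :=
  words.foldl
    (fun st w => w.toList.foldl
      (fun st c =>
        if PySem.Set.contains st.1 c = false then (PySem.Set.add st.1 c, st.2 ++ [c]) else st)
      st)
    (PySem.Set.empty, [])

def mcwMaxCount (words : List String) (c : Char) : List String :=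
  match PySem.List.max? (words.map (fun w => (PySem.Str.count w (String.ofList [c]) : Int))) (fun x => x) with
  | some m => List.replicate m.toNat (String.ofList [c])
  | none => []

def minimumCharactersForWords_alt (words : List String) : List String :=
  (mcwOrder words).2.foldl (fun acc c => acc ++ mcwMaxCount words c) []

-- ===== PRECONDITION & SPEC =====
def Spec_minimumCharactersForWords (words : List String) (out : List String) : Prop := out = minimumCharactersForWords_alt words
instance (words : List String) (out : List String) : Decidable (Spec_minimumCharactersForWords words out) := by unfold Spec_minimumCharactersForWords; infer_instance

-- ===== CLAIM (what is proved, stated in full; the proofs are below) =====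
def Claim_equal_minimumCharactersForWords : Prop := ∀ (words : List String), Dom_minimumCharactersForWords words → Spec_minimumCharactersForWords words (minimumCharactersForWords words)

-- ===== LEMMAS AND PROOFS =====

-- Chars.count with a singleton needle is List.count
theorem mcw_count_go_single (c : Char) : ∀ (fuel : Nat) (l : List Char) (acc : Nat),
    l.length ≤ fuel → PySem.Chars.count.go [c] fuel l acc = acc + l.count c := by
  intro fuel
  induction fuel with
  | zero => intro l acc h; simp at h; simp [h, PySem.Chars.count.go]
  | succ n ih =>
    intro l acc h
    cases l with
    | nil => simp [PySem.Chars.count.go]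
    | cons x t =>
      simp only [PySem.Chars.count.go]
      by_cases hx : x = c
      · simp [hx, List.isPrefixOf, ih t (acc+1) (by simpa using h)]
        omega
      · have := ih t acc (by simpa using h)
        simp [hx, this, List.isPrefixOf]
        exact fun hcx => absurd hcx.symm hx

theorem mcw_count_single (cs : List Char) (c : Char) :
    PySem.Chars.count cs [c] = cs.count c := by
  simp [PySem.Chars.count, mcw_count_go_single c cs.length cs 0 le_rfl]

-- invariant of A's inner (per-word) loop
theorem mcw_inner (l : List Char) : ∀ (f r : PySem.Dict Char Int),
    f.keys.Nodup → (∀ c, f.contains c = r.contains c) → (∀ c, 0 ≤ r.getD c 0) →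
    (∀ k, (l.foldl mcwStep (f, r)).1.getD k 0
        = f.getD k 0 + max 0 ((l.count k : Int) - r.getD k 0)) ∧
    (∀ k, (l.foldl mcwStep (f, r)).2.getD k 0 = max 0 (r.getD k 0 - (l.count k : Int))) ∧
    (l.foldl mcwStep (f, r)).1.keys = PySem.Set.update f.keys l ∧
    (l.foldl mcwStep (f, r)).1.keys.Nodup := by
  induction l with
  | nil =>
    intro f r h1 h2 h3
    refine ⟨fun k => ?_, fun k => ?_, by simp [PySem.Set.update], h1⟩
    · simp; exact h3 k
    · simp; exact h3 k
  | cons c t ih =>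
    intro f r h1 h2 h3
    simp only [List.foldl_cons]
    by_cases hc : f.contains c = false
    · -- new char
      have hrc : r.contains c = false := (h2 c).symm.trans hc
      have hstep : mcwStep (f, r) c = (f.insert c 1, r.insert c 0) := by
        simp [mcwStep, hc]
      rw [hstep]
      have hmem : c ∉ f.keys := by
        intro hm
        rw [← PySem.Dict.contains_iff_mem_keys] at hm
        simp [hc] at hm
      obtain ⟨ih1, ih2, ih3, ih4⟩ := ih (f.insert c 1) (r.insert c 0)
        (PySem.Dict.nodup_keys_insert _ _ _ h1)
        (by intro k; rw [PySem.Dict.contains_insert, PySem.Dict.contains_insert, h2])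
        (by intro k
            rw [PySem.Dict.getD_insert]
            split_ifs with h
            · norm_num
            · exact h3 k)
      refine ⟨fun k => ?_, fun k => ?_, ?_, ih4⟩
      · rw [ih1 k, PySem.Dict.getD_insert, PySem.Dict.getD_insert]
        by_cases hk : k = c
        · subst hk
          rw [PySem.Dict.getD_of_not_contains _ _ hc,
              PySem.Dict.getD_of_not_contains _ _ hrc]
          simp [List.count_cons]
          try omega
        · simp [hk, List.count_cons, Ne.symm hk]
      · rw [ih2 k, PySem.Dict.getD_insert]
        by_cases hk : k = c
        · subst hk
          rw [PySem.Dict.getD_of_not_contains _ _ hrc]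
          simp [List.count_cons]
          try omega
        · simp [hk, List.count_cons, Ne.symm hk]
      · rw [ih3, PySem.Dict.keys_insert_of_not_contains _ _ hc]
        simp [PySem.Set.update, PySem.Set.add, PySem.Set.contains, hmem]
    · -- known char
      replace hc : f.contains c = true := by simpa using hc
      have hmem : c ∈ f.keys := (PySem.Dict.contains_iff_mem_keys _ _).mp hc
      have hadd : PySem.Set.add f.keys c = f.keys := by
        simp [PySem.Set.add, PySem.Set.contains, hmem]
      by_cases hr : r.getD c 0 ≠ 0
      · -- remaining > 0: decrement remaining
        have hstep : mcwStep (f, r) c = (f, r.insert c (r.getD c 0 - 1)) := by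
          simp [mcwStep, hc, hr]
        rw [hstep]
        obtain ⟨ih1, ih2, ih3, ih4⟩ := ih f (r.insert c (r.getD c 0 - 1)) h1
          (by intro k
              rw [PySem.Dict.contains_insert]
              by_cases hk : k = c
              · subst hk; simp [hc]
              · simp [hk, h2])
          (by intro k
              rw [PySem.Dict.getD_insert]
              split_ifs with h
              · have := h3 c; omega
              · exact h3 k)
        refine ⟨fun k => ?_, fun k => ?_, ?_, ih4⟩
        · rw [ih1 k, PySem.Dict.getD_insert]
          by_cases hk : k = c
          · subst hk; simp [List.count_cons]; try omega
          · simp [hk, List.count_cons, Ne.symm hk]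
        · rw [ih2 k, PySem.Dict.getD_insert]
          by_cases hk : k = c
          · subst hk; simp [List.count_cons]; try omega
          · simp [hk, List.count_cons, Ne.symm hk]
        · rw [ih3]; simp [PySem.Set.update, hadd]
      · -- remaining exhausted: bump frequency
        rw [not_not] at hr
        have hstep : mcwStep (f, r) c = (f.insert c (f.getD c 0 + 1), r) := by
          simp [mcwStep, hc, hr]
        rw [hstep]
        obtain ⟨ih1, ih2, ih3, ih4⟩ := ih (f.insert c (f.getD c 0 + 1)) r
          (PySem.Dict.nodup_keys_insert _ _ _ h1)
          (by intro k
              rw [PySem.Dict.contains_insert]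
              by_cases hk : k = c
              · subst hk; simp [← h2, hc]
              · simp [hk, h2])
          h3
        refine ⟨fun k => ?_, fun k => ?_, ?_, ih4⟩
        · rw [ih1 k, PySem.Dict.getD_insert]
          by_cases hk : k = c
          · subst hk; simp [List.count_cons, hr]; try omega
          · simp [hk, List.count_cons, Ne.symm hk]
        · rw [ih2 k]
          by_cases hk : k = c
          · subst hk; simp [List.count_cons, hr]; try omega
          · simp [hk, List.count_cons, Ne.symm hk]
        · rw [ih3, PySem.Dict.keys_insert_of_contains _ _ hc]
          simp [PySem.Set.update, hadd]


theorem mcw_word_spec (f : PySem.Dict Char Int) (w : String)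
    (h1 : f.keys.Nodup) (h2 : ∀ c, 0 ≤ f.getD c 0) :
    (∀ k, (mcwWord f w).getD k 0 = max (f.getD k 0) ((w.toList.count k : Int))) ∧
    (mcwWord f w).keys = PySem.Set.update f.keys w.toList ∧ (mcwWord f w).keys.Nodup := by
  obtain ⟨i1, _, i3, i4⟩ := mcw_inner w.toList f f h1 (fun c => rfl) h2
  exact ⟨fun k => by rw [mcwWord, i1 k]; have := h2 k; omega, i3, i4⟩

theorem mcw_outer (ws : List String) : ∀ (d : PySem.Dict Char Int),
    d.keys.Nodup → (∀ c, 0 ≤ d.getD c 0) →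
    (∀ k, (ws.foldl mcwWord d).getD k 0
        = ws.foldl (fun m w => max m ((w.toList.count k : Int))) (d.getD k 0)) ∧
    (ws.foldl mcwWord d).keys = PySem.Set.update d.keys (ws.flatMap String.toList) ∧
    (ws.foldl mcwWord d).keys.Nodup := by
  induction ws with
  | nil => intro d h1 h2; exact ⟨fun k => rfl, rfl, h1⟩
  | cons w rest ih =>
    intro d h1 h2
    obtain ⟨w1, w2, w3⟩ := mcw_word_spec d w h1 h2
    obtain ⟨i1, i2, i3⟩ := ih (mcwWord d w) w3
      (fun c => by rw [w1 c]; have := h2 c; positivity)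
    refine ⟨fun k => ?_, ?_, i3⟩
    · simp only [List.foldl_cons]
      rw [i1 k, w1 k]
    · simp only [List.foldl_cons]
      rw [i2, w2]
      simp [PySem.Set.update, List.foldl_append]

theorem mcw_order_inner (l : List Char) : ∀ (s : PySem.Set Char),
    l.foldl (fun st c =>
        if PySem.Set.contains st.1 c = false then (PySem.Set.add st.1 c, st.2 ++ [c]) else st)
      (s, s)
    = (PySem.Set.update s l, PySem.Set.update s l) := by
  induction l with
  | nil => intro s; rfl
  | cons c t ih =>
    intro s
    simp only [List.foldl_cons]
    by_cases hc : PySem.Set.contains s c = false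
    · have hmem : c ∉ s := by simpa [PySem.Set.contains] using hc
      have hadd : PySem.Set.add s c = s ++ [c] := by simp [PySem.Set.add, PySem.Set.contains, hmem]
      simp only [hc, if_true]
      rw [← hadd, ih (PySem.Set.add s c)]
      simp [PySem.Set.update]
    · replace hc : PySem.Set.contains s c = true := by simpa using hc
      have hmem : c ∈ s := by simpa [PySem.Set.contains] using hc
      have hadd : PySem.Set.add s c = s := by simp [PySem.Set.add, PySem.Set.contains, hmem]
      simp only [hc]
      rw [if_neg (by simp), ih s]
      simp only [PySem.Set.update, List.foldl_cons]
      rw [hadd]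

theorem mcw_order_spec (words : List String) :
    mcwOrder words
      = (PySem.Set.ofList (words.flatMap String.toList),
         PySem.Set.ofList (words.flatMap String.toList)) := by
  have main : ∀ (ws : List String) (s : PySem.Set Char),
      ws.foldl
        (fun st w => w.toList.foldl
          (fun st c =>
            if PySem.Set.contains st.1 c = false then (PySem.Set.add st.1 c, st.2 ++ [c]) else st)
          st)
        (s, s)
      = (PySem.Set.update s (ws.flatMap String.toList),
         PySem.Set.update s (ws.flatMap String.toList)) := by
    intro ws
    induction ws with
    | nil => intro s; rfl
    | cons w rest ih =>
      intro s
      simp only [List.foldl_cons]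
      rw [mcw_order_inner w.toList s, ih (PySem.Set.update s w.toList)]
      simp [PySem.Set.update, List.foldl_append]
  exact main words PySem.Set.empty


theorem mcw_counts_eq (w : String) (k : Char) :
    ((PySem.Str.count w (String.ofList [k]) : Int)) = ((w.toList.count k : Int)) := by
  rw [PySem.Str.count_eq]
  norm_cast
  rw [show (String.ofList [k]).toList = [k] by simp]
  exact mcw_count_single _ _

theorem mcw_piece (w : String) (rest : List String) (k : Char) :
    (PySem.List.pyRange 0
        ((w :: rest).foldl (fun m w => max m ((w.toList.count k : Int))) 0) 1).map
        (fun _ => String.ofList [k])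
      = mcwMaxCount (w :: rest) k := by
  rw [mcwMaxCount]
  have hmap : (w :: rest).map (fun w => ((PySem.Str.count w (String.ofList [k]) : Int)))
      = ((w.toList.count k : Int)) :: rest.map (fun w => ((w.toList.count k : Int))) := by
    simp only [List.map_cons]
    rw [mcw_counts_eq]
    congr 1
    exact List.map_congr_left (fun x _ => mcw_counts_eq x k)
  rw [hmap, PySem.List.max?_id_cons]
  have hfold : (w :: rest).foldl (fun m w => max m ((w.toList.count k : Int))) 0
      = (rest.map (fun w => ((w.toList.count k : Int)))).foldl max ((w.toList.count k : Int)) := by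
    simp only [List.foldl_cons, List.foldl_map]
    congr 1
  rw [hfold]
  simp [List.map_const', PySem.List.length_pyRange_one]

-- ===== VERDICT (by name: the statement is the Claim_ definition above) =====
theorem minimumCharactersForWords_spec : Claim_equal_minimumCharactersForWords := by
  intro words _
  unfold Spec_minimumCharactersForWords
  obtain ⟨o1, o2, o3⟩ := mcw_outer words PySem.Dict.empty PySem.Dict.nodup_keys_empty
    (fun c => by simp)
  have hkeys : (words.foldl mcwWord PySem.Dict.empty).keys
      = PySem.Set.ofList (words.flatMap String.toList) := o2
  simp only [minimumCharactersForWords, minimumCharactersForWords_alt]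
  rw [mcw_order_spec]
  rw [PySem.Dict.items_eq_map_keys _ o3 (0 : Int), hkeys]
  rw [PySem.List.foldl_append_eq_flatMap, PySem.List.foldl_append_eq_flatMap]
  simp only [List.nil_append]
  rw [List.flatMap_map]
  cases words with
  | nil => rfl
  | cons w rest =>
    congr 1
    funext k
    rw [o1 k]
    have h0 : (PySem.Dict.empty : PySem.Dict Char Int).getD k 0 = 0 := rfl
    rw [h0]
    exact mcw_piece w rest k
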